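-- pv_equiv track=rewrite | github.com/sacherjj/changelog-utils | changelog_util.py | _clean_extra_empty_lines
-- ===== SOURCE A (Python) =====
-- MAX_EMPTY_LINES = 3
--
-- def _clean_extra_empty_lines(text_lines: list, line_count: int = MAX_EMPTY_LINES) -> list:
--     """
--     Trims more than line_count empty lines
--
--     :param text_lines: file_text as list of str
--     :return: list of str
--     """
--     output = []
--     clean_line_count = 0
--     for line in text_lines:
--         line = line.strip()
--         if line == "":
--             clean_line_count += 1
--         else:
--             clean_line_count = 0
--         if clean_line_count <= line_count:
--             output.append(line)
--     return output
-- ===== SOURCE B (Python) =====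
-- MAX_EMPTY_LINES = 3
--
-- def _clean_extra_empty_lines(text_lines: list, line_count: int = MAX_EMPTY_LINES) -> list:
--     """Trims more than line_count empty lines (run-based pass over stripped lines)."""
--     stripped = [ln.strip() for ln in text_lines]
--     out = []
--     i = 0
--     n = len(stripped)
--     while i < n:
--         j = i
--         if stripped[i] == "":
--             while j < n and stripped[j] == "":
--                 j += 1
--             out.extend([""] * min(j - i, line_count))
--         else:
--             while j < n and stripped[j] != "":
--                 j += 1
--             out.extend(stripped[i:j])
--         i = j
--     return out
-- ===== Notes on version B (the rewrite author's own statement) =====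
-- stated objective: alternative
-- what changed: B strips all lines first and then walks maximal runs of consecutive equal-emptiness lines, emitting min(run length, line_count) blanks per empty run, instead of A's per-line reset counter; Pre_ restricts to the natural domain of non-negative limits, since on a negative limit A accidentally drops even non-empty lines.
-- outside the precondition, e.g. on _clean_extra_empty_lines(['x'], -1): A returns [], B returns ['x']
import Mathlib
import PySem

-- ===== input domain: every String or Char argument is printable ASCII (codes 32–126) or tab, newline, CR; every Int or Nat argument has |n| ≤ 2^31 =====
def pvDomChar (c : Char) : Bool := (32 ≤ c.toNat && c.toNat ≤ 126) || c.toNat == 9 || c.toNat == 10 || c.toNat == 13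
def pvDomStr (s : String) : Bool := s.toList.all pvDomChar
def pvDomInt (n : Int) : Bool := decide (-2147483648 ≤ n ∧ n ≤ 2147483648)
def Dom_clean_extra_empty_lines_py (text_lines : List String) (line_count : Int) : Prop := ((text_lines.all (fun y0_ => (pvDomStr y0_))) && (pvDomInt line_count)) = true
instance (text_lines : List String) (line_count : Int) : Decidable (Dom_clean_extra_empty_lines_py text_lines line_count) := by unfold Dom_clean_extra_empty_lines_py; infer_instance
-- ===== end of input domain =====

-- B replaces A's per-line reset counter by a run-based pass over pre-stripped lines
-- (emit min(run length, line_count) blanks per empty run); alternative decomposition, same cost.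

-- ===== PORT A =====
def clean_extra_empty_lines_py (text_lines : List String) (line_count : Int) : List String :=
  (text_lines.foldl
    (fun (st : List String × Int) line =>
      let l := PySem.Str.strip line
      let c := if l = "" then st.2 + 1 else 0
      if c ≤ line_count then (st.1 ++ [l], c) else (st.1, c))
    ([], 0)).1

-- ===== PORT B =====
-- run loop of Source B: consume one maximal run of empty / non-empty lines per step;
-- Python's '[""] * min(j - i, line_count)' is replicate (…).toNat "" (negative count → empty list, exact)
def pvRunsB (line_count : Int) : List String → List String
  | [] => []
  | l :: ls =>
    if l = "" then
      List.replicate (min (((ls.takeWhile (· == "")).length : Int) + 1) line_count).toNat "" ++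
        pvRunsB line_count (ls.dropWhile (· == ""))
    else
      (l :: ls.takeWhile (· != "")) ++ pvRunsB line_count (ls.dropWhile (· != ""))
  termination_by l => l.length
  decreasing_by
  · have := List.length_dropWhile_le (p := (· == "")) (l := ls); simpa using Nat.lt_succ_of_le this
  · have := List.length_dropWhile_le (p := (· != "")) (l := ls); simpa using Nat.lt_succ_of_le this

def clean_extra_empty_lines_py_alt (text_lines : List String) (line_count : Int) : List String :=
  pvRunsB line_count (text_lines.map PySem.Str.strip)

-- ===== PRECONDITION & SPEC =====
-- Pre_ restricts to the natural domain of non-negative line limits: on a negative limit A's value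
-- (dropping even non-empty lines) is an accident of its counter test, while B keeps the content.
def Pre_clean_extra_empty_lines_py (text_lines : List String) (line_count : Int) : Prop := 0 ≤ line_count
instance (text_lines : List String) (line_count : Int) : Decidable (Pre_clean_extra_empty_lines_py text_lines line_count) := by unfold Pre_clean_extra_empty_lines_py; infer_instance

def pvWitness_clean_extra_empty_lines_py : List String × Int := (["a", "", "", "b"], 1)

def Spec_clean_extra_empty_lines_py (text_lines : List String) (line_count : Int) (out : List String) : Prop := out = clean_extra_empty_lines_py_alt text_lines line_count
instance (text_lines : List String) (line_count : Int) (out : List String) : Decidable (Spec_clean_extra_empty_lines_py text_lines line_count out) := by unfold Spec_clean_extra_empty_lines_py; infer_instance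

-- ===== CLAIM (what is proved, stated in full; the proofs are below) =====
def Claim_equal_clean_extra_empty_lines_py : Prop := ∀ (text_lines : List String) (line_count : Int), Dom_clean_extra_empty_lines_py text_lines line_count → Pre_clean_extra_empty_lines_py text_lines line_count → Spec_clean_extra_empty_lines_py text_lines line_count (clean_extra_empty_lines_py text_lines line_count)

-- ===== LEMMAS AND PROOFS =====

-- A's loop in direct-recursive form over the already-stripped lines
def pvARec (lc : Int) : List String → Int → List String
  | [], _ => []
  | l :: ls, c =>
    let c' := if l = "" then c + 1 else 0
    (if c' ≤ lc then [l] else []) ++ pvARec lc ls c'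

theorem pvFold_eq_aRec (lc : Int) (tl : List String) :
    ∀ (acc : List String) (c : Int),
    (tl.foldl
      (fun (st : List String × Int) line =>
        let l := PySem.Str.strip line
        let c := if l = "" then st.2 + 1 else 0
        if c ≤ lc then (st.1 ++ [l], c) else (st.1, c))
      (acc, c)).1 = acc ++ pvARec lc (tl.map PySem.Str.strip) c := by
  induction tl with
  | nil => intro acc c; simp [pvARec]
  | cons x xs ih =>
    intro acc c
    simp only [List.foldl_cons, List.map_cons, pvARec]
    by_cases h : PySem.Str.strip x = "" <;> simp [h, ih] <;> split_ifs <;> simp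

-- head of dropWhile fails the predicate
theorem pvDropWhile_head (p : String → Bool) : ∀ (l : List String),
    (List.dropWhile p l = []) ∨ (∃ x xs, List.dropWhile p l = x :: xs ∧ p x = false) := by
  intro l
  induction l with
  | nil => exact Or.inl rfl
  | cons y ys ih =>
    by_cases hy : p y = true
    · simpa [List.dropWhile_cons, hy] using ih
    · exact Or.inr ⟨y, ys, by simp [hy], by simpa using hy⟩

-- counter is irrelevant when the next line is non-empty (or the list ends)
theorem pvARec_reset (lc : Int) (rest : List String)
    (h : rest = [] ∨ ∃ x xs, rest = x :: xs ∧ x ≠ "") (c c' : Int) :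
    pvARec lc rest c = pvARec lc rest c' := by
  rcases h with h | ⟨x, xs, rfl, hx⟩
  · subst h; rfl
  · simp [pvARec, hx]

-- an all-empty run of length k starting at counter c contributes (min (c+k) lc - c).toNat blanks
theorem pvARec_empty_run (lc : Int) : ∀ (run : List String), (∀ x ∈ run, x = "") →
    ∀ (rest : List String) (c : Int),
    pvARec lc (run ++ rest) c =
      List.replicate (min (c + run.length) lc - c).toNat "" ++ pvARec lc rest (c + run.length) := by
  intro run
  induction run with
  | nil => intro _ rest c; simp
  | cons x xs ih =>
    intro hall rest c
    have hx : x = "" := hall x (by simp)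
    subst hx
    have hxs : ∀ y ∈ xs, y = "" := fun y hy => hall y (by simp [hy])
    simp only [List.cons_append, pvARec, if_true]
    rw [ih hxs rest (c + 1)]
    by_cases h : c + 1 ≤ lc
    · rw [if_pos h]
      simp only [List.length_cons]
      push_cast
      rw [show (min (c + ((xs.length : Int) + 1)) lc - c).toNat
            = (min (c + 1 + (xs.length : Int)) lc - (c + 1)).toNat + 1 by omega,
          List.replicate_succ]
      simp [show c + 1 + (xs.length : Int) = c + ((xs.length : Int) + 1) by ring]
    · rw [if_neg h]
      simp only [List.length_cons]
      push_cast
      rw [show (min (c + 1 + (xs.length : Int)) lc - (c + 1)).toNat = 0 by omega,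
          show (min (c + ((xs.length : Int) + 1)) lc - c).toNat = 0 by omega]
      simp [show c + 1 + (xs.length : Int) = c + ((xs.length : Int) + 1) by ring]

-- a non-empty run is emitted wholesale and resets the counter to 0
theorem pvARec_nonempty_run (lc : Int) (hlc : 0 ≤ lc) :
    ∀ (run : List String) (x : String), x ≠ "" → (∀ y ∈ run, y ≠ "") →
    ∀ (rest : List String) (c : Int),
    pvARec lc (x :: run ++ rest) c = x :: run ++ pvARec lc rest 0 := by
  intro run
  induction run with
  | nil => intro x hx rest c; simp [pvARec, hx, hlc]
  | cons y ys ih =>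
    intro x hx hall rest c
    have hy : y ≠ "" := hall y (by simp)
    have hys : ∀ z ∈ ys, z ≠ "" := fun z hz => hall z (by simp [hz])
    have := ih y hy hys rest 0
    simp only [List.cons_append, pvARec, if_neg hx, if_pos hlc] at *
    simpa using this

theorem pvARec_eq_runsB (lc : Int) (hlc : 0 ≤ lc) : ∀ (l : List String),
    pvARec lc l 0 = pvRunsB lc l := by
  intro l
  induction l using pvRunsB.induct with
  | case1 => rw [pvRunsB]; rfl
  | case2 ls ih =>
    rw [pvRunsB]
    simp only [if_true]
    have hrun : ∀ y ∈ (ls.takeWhile (· == "")), y = "" := by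
      intro y hy
      have h2 : (y == "") = true := List.mem_takeWhile_imp (p := (· == "")) hy
      simpa using h2
    have hsplit : ("" :: ls : List String) = ("" :: ls.takeWhile (· == "")) ++ ls.dropWhile (· == "") := by
      simp [List.takeWhile_append_dropWhile]
    have hall2 : ∀ y ∈ ("" :: ls.takeWhile (· == "") : List String), y = "" := by
      intro y hy
      rcases List.mem_cons.mp hy with h | h
      · exact h
      · exact hrun _ h
    rw [hsplit, pvARec_empty_run lc ("" :: ls.takeWhile (· == "")) hall2]
    have hrest : (ls.dropWhile (· == "")) = [] ∨ ∃ x xs, (ls.dropWhile (· == "")) = x :: xs ∧ x ≠ "" := by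
      rcases pvDropWhile_head (· == "") ls with h | ⟨x, xs, h, hpx⟩
      · exact Or.inl h
      · exact Or.inr ⟨x, xs, h, by simpa using hpx⟩
    rw [pvARec_reset lc _ hrest _ 0, ih]
    congr 2
    simp only [List.length_cons]
    push_cast
    omega
  | case3 x ls hx ih =>
    rw [pvRunsB]
    simp only [if_neg hx]
    have hrun : ∀ y ∈ (ls.takeWhile (· != "")), y ≠ "" := by
      intro y hy
      have h2 : (y != "") = true := List.mem_takeWhile_imp (p := (· != "")) hy
      simpa using h2
    have hsplit : (x :: ls : List String) = x :: ls.takeWhile (· != "") ++ ls.dropWhile (· != "") := by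
      simp [List.takeWhile_append_dropWhile]
    rw [hsplit, pvARec_nonempty_run lc hlc _ x hx hrun, ih]

-- ===== VERDICT (by name: the statement is the Claim_ definition above) =====
theorem clean_extra_empty_lines_py_spec : Claim_equal_clean_extra_empty_lines_py := by
  intro text_lines line_count _ hpre
  unfold Spec_clean_extra_empty_lines_py clean_extra_empty_lines_py clean_extra_empty_lines_py_alt
  rw [pvFold_eq_aRec, List.nil_append, pvARec_eq_runsB line_count hpre]
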